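-- pv_equiv track=rewrite | github.com/eliottcassidy2000/math | 04-computation/deletion_contraction_F_poly.py | ham_paths_by_fwd
-- ===== SOURCE A (Python) =====
-- def ham_paths_by_fwd(adj, n):
--     """Count Ham paths by number of forward edges. Returns dict {fwd_count: path_count}."""
--     full = (1 << n) - 1
--     # dp[mask][v] = dict: fwd_count -> count
--     dp = [[None]*n for _ in range(1 << n)]
--     for v in range(n):
--         dp[1 << v][v] = {0: 1}
--     for mask in range(1, 1 << n):
--         for v in range(n):
--             if dp[mask][v] is None:
--                 continue
--             for u in range(n):
--                 if mask & (1 << u):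
--                     continue
--                 if adj[v][u]:
--                     new_mask = mask | (1 << u)
--                     if dp[new_mask][u] is None:
--                         dp[new_mask][u] = {}
--                     for fc, cnt in dp[mask][v].items():
--                         dp[new_mask][u][fc+1] = dp[new_mask][u].get(fc+1, 0) + cnt
--                 elif adj[u][v]:
--                     # backward edge u<-v, still a valid step v->u in the path
--                     new_mask = mask | (1 << u)
--                     if dp[new_mask][u] is None:
--                         dp[new_mask][u] = {}
--                     for fc, cnt in dp[mask][v].items():
--                         dp[new_mask][u][fc] = dp[new_mask][u].get(fc, 0) + cnt
--                 # else: no edge between v and u (happens in digraphs)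
--     F = {}
--     for v in range(n):
--         if dp[full][v] is not None:
--             for fc, cnt in dp[full][v].items():
--                 F[fc] = F.get(fc, 0) + cnt
--     return F
-- ===== SOURCE B (Python) =====
-- def ham_paths_by_fwd(adj, n):
--     """Count Ham paths by number of forward edges. Returns dict {fwd_count: path_count}."""
--     memo = {}
--
--     def paths(mask, u):
--         # dict fwd_count -> number of Ham paths of the vertex set `mask` ending at u
--         if mask == (1 << u):
--             return {0: 1}
--         if (mask, u) in memo:
--             return memo[(mask, u)]
--         res = {}
--         pm = mask - (1 << u)  # predecessor set (u is in mask whenever we are called)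
--         for v in range(n):
--             if not (pm >> v) & 1:
--                 continue
--             if adj[v][u]:
--                 for fc, c in paths(pm, v).items():
--                     res[fc + 1] = res.get(fc + 1, 0) + c
--             elif adj[u][v]:
--                 for fc, c in paths(pm, v).items():
--                     res[fc] = res.get(fc, 0) + c
--         memo[(mask, u)] = res
--         return res
--
--     full = (1 << n) - 1
--     F = {}
--     for u in range(n):
--         for fc, c in paths(full, u).items():
--             F[fc] = F.get(fc, 0) + c
--     return F
-- ===== Notes on version B (the rewrite author's own statement) =====
-- stated objective: alternative
-- what changed: Replaces the bottom-up push-style bitmask DP over a (1<<n) x n table of optional dicts by top-down memoized recursion: paths(mask,u) returns the fwd-count dict for Hamiltonian paths of vertex set mask ending at u, computed on demand from its single predecessor mask and cached.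
import Mathlib
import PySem

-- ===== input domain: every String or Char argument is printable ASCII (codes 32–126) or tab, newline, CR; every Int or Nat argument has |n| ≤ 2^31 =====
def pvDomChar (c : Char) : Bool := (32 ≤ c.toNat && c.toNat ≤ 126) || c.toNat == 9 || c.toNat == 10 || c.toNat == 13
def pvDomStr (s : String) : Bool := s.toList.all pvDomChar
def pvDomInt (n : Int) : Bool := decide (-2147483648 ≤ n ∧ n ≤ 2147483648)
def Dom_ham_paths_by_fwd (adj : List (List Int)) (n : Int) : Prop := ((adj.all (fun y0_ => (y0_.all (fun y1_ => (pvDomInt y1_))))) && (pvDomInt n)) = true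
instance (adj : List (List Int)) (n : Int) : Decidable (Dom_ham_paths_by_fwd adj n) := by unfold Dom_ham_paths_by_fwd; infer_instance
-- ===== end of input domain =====

-- B replaces A's bottom-up push-style bitmask DP over a (2^n)×n table of optional dicts by
-- top-down memoized recursion paths(mask,u) (dict of fwd-counts for Ham paths of vertex set
-- `mask` ending at u), computed on demand from the single predecessor mask and cached.

-- ===== PORT A =====
-- shared helpers (both Pythons contain these fragments verbatim):
-- adj[v][u]; exact on Pre_ (both programs only index with v,u in range there)
def pvAdj (adj : List (List Int)) (v u : Nat) : Int := (adj.getD v []).getD u 0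
-- `for fc, cnt in src.items(): d[fc+δ] = d.get(fc+δ, 0) + cnt`
def pvBump (d src : PySem.Dict Int Int) (δ : Int) : PySem.Dict Int Int :=
  src.items.foldl (fun d fcc => d.insert (fcc.1 + δ) (d.getD (fcc.1 + δ) 0 + fcc.2)) d

-- the mutable table dp (a list of rows); dp[mask][v] reads, dp[mask][v] = X writes
abbrev pvTab : Type := List (List (Option (PySem.Dict Int Int)))

def pvGet (t : pvTab) (M u : Nat) : Option (PySem.Dict Int Int) := (t.getD M []).getD u none

def pvSet (t : pvTab) (M u : Nat) (d : Option (PySem.Dict Int Int)) : pvTab :=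
  t.set M ((t.getD M []).set u d)

-- `if dp[new_mask][u] is None: dp[new_mask][u] = {}` followed by the items loop
def pvPush (t : pvTab) (m v M u : Nat) (δ : Int) : pvTab :=
  let t1 := match pvGet t M u with
            | none => pvSet t M u (some PySem.Dict.empty)
            | some _ => t
  pvSet t1 M u
    (some (pvBump ((pvGet t1 M u).getD PySem.Dict.empty) ((pvGet t1 m v).getD PySem.Dict.empty) δ))

def pvStepU (adj : List (List Int)) (m v : Nat) (t : pvTab) (u : Nat) : pvTab :=
  if m.testBit u then t           -- `if mask & (1 << u): continue`
  -- new_mask = mask | (1 << u); bit u of mask is clear in this branch, so it equals mask + 2^u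
  else if pvAdj adj v u ≠ 0 then pvPush t m v (m + 2^u) u 1
  else if pvAdj adj u v ≠ 0 then pvPush t m v (m + 2^u) u 0
  else t

def pvStepV (adj : List (List Int)) (N m : Nat) (t : pvTab) (v : Nat) : pvTab :=
  match pvGet t m v with                -- `if dp[mask][v] is None: continue`
  | none => t
  | some _ => (List.range N).foldl (pvStepU adj m v) t

def pvStepMask (adj : List (List Int)) (N : Nat) (t : pvTab) (m : Nat) : pvTab :=
  (List.range N).foldl (pvStepV adj N m) t

-- `dp = [[None]*n for _ in range(1 << n)]; for v in range(n): dp[1 << v][v] = {0: 1}`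
def pvInit (N : Nat) : pvTab :=
  (List.range N).foldl (fun t v => pvSet t (2^v) v (some (PySem.Dict.empty.insert 0 1)))
    (List.replicate (2^N) (List.replicate N none))

def ham_paths_by_fwd (adj : List (List Int)) (n : Int) : List (Int × Int) :=
  let N := n.toNat
  let dpF := (List.range' 1 (2^N - 1)).foldl (pvStepMask adj N) (pvInit N)  -- range(1, 1 << n)
  ((List.range N).foldl
      (fun F v => match pvGet dpF (2^N - 1) v with     -- full = (1 << n) - 1
                  | none => F
                  | some d => pvBump F d 0) PySem.Dict.empty).items

-- ===== PORT B =====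
mutual
-- paths(mask, u): dict fwd_count -> number of Ham paths of vertex set mask ending at u
def pvPathsB (adj : List (List Int)) (N : Nat) (mask u : Nat)
    (memo : PySem.Dict (Nat × Nat) (PySem.Dict Int Int)) :
    PySem.Dict Int Int × PySem.Dict (Nat × Nat) (PySem.Dict Int Int) :=
  if h : mask.testBit u = false then (PySem.Dict.empty, memo)  -- totality guard only; Python always calls with u ∈ mask
  else if mask = 2^u then (PySem.Dict.empty.insert 0 1, memo)  -- `if mask == (1 << u): return {0: 1}`
  else match memo.get? (mask, u) with
  | some d => (d, memo)
  | none =>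
    let r := pvPathsLoop adj N u (mask - 2^u) (List.range N) PySem.Dict.empty memo
    (r.1, r.2.insert (mask, u) r.1)
termination_by (mask, 1)
decreasing_by
  have h0 : mask ≠ 0 := by intro he; subst he; simp [Nat.zero_testBit] at h
  have hlt : mask - 2^u < mask := Nat.sub_lt (Nat.pos_of_ne_zero h0) (Nat.two_pow_pos u)
  simp_wf
  omega

-- `for v in range(n): …` body of paths, threading res and the memo cache
def pvPathsLoop (adj : List (List Int)) (N : Nat) (u pm : Nat) (l : List Nat)
    (res : PySem.Dict Int Int) (memo : PySem.Dict (Nat × Nat) (PySem.Dict Int Int)) :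
    PySem.Dict Int Int × PySem.Dict (Nat × Nat) (PySem.Dict Int Int) :=
  match l with
  | [] => (res, memo)
  | v :: vs =>
    if pm.testBit v = false then pvPathsLoop adj N u pm vs res memo  -- `if not (pm >> v) & 1: continue`
    else if pvAdj adj v u ≠ 0 then
      let r := pvPathsB adj N pm v memo
      pvPathsLoop adj N u pm vs (pvBump res r.1 1) r.2
    else if pvAdj adj u v ≠ 0 then
      let r := pvPathsB adj N pm v memo
      pvPathsLoop adj N u pm vs (pvBump res r.1 0) r.2
    else pvPathsLoop adj N u pm vs res memo
termination_by (pm, l.length + 2)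
decreasing_by all_goals simp_wf <;> omega
end

def ham_paths_by_fwd_alt (adj : List (List Int)) (n : Int) : List (Int × Int) :=
  let N := n.toNat
  let full := 2^N - 1                               -- full = (1 << n) - 1
  ((List.range N).foldl
      (fun (p : PySem.Dict Int Int × PySem.Dict (Nat × Nat) (PySem.Dict Int Int)) u =>
        let r := pvPathsB adj N full u p.2
        (pvBump p.1 r.1 0, r.2))
      (PySem.Dict.empty, PySem.Dict.empty)).1.items

-- ===== PRECONDITION & SPEC =====
-- A raises ValueError when n < 0 (negative shift) and IndexError when adj is smaller than the
-- n×n matrix the DP indexes (A reads adj[v][u] for every pair v ≠ u below n): Pre_ excludes those.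
def Pre_ham_paths_by_fwd (adj : List (List Int)) (n : Int) : Prop :=
  0 ≤ n ∧ n.toNat ≤ adj.length ∧
    ∀ v ∈ List.range n.toNat, ∀ u ∈ List.range n.toNat, u ≠ v → u < (adj.getD v []).length
instance (adj : List (List Int)) (n : Int) : Decidable (Pre_ham_paths_by_fwd adj n) := by
  unfold Pre_ham_paths_by_fwd; infer_instance

def pvWitness_ham_paths_by_fwd : List (List Int) × Int := ([[0, 1], [1, 0]], 2)

def Spec_ham_paths_by_fwd (adj : List (List Int)) (n : Int) (out : List (Int × Int)) : Prop := out = ham_paths_by_fwd_alt adj n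
instance (adj : List (List Int)) (n : Int) (out : List (Int × Int)) : Decidable (Spec_ham_paths_by_fwd adj n out) := by unfold Spec_ham_paths_by_fwd; infer_instance

-- ===== CLAIM (what is proved, stated in full; the proofs are below) =====
def Claim_equal_ham_paths_by_fwd : Prop := ∀ (adj : List (List Int)) (n : Int), Dom_ham_paths_by_fwd adj n → Pre_ham_paths_by_fwd adj n → Spec_ham_paths_by_fwd adj n (ham_paths_by_fwd adj n)

-- ===== LEMMAS AND PROOFS =====

-- the common mathematical object both programs compute: the dict of forward-edge counts of
-- Hamiltonian paths of vertex set `mask` ending at `u`, sources merged in ascending order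
def pvGStep (adj : List (List Int)) (u pm : Nat) (f : Nat → PySem.Dict Int Int)
    (res : PySem.Dict Int Int) (v : Nat) : PySem.Dict Int Int :=
  if pm.testBit v = false then res
  else if pvAdj adj v u ≠ 0 then pvBump res (f v) 1
  else if pvAdj adj u v ≠ 0 then pvBump res (f v) 0
  else res

def pvG (adj : List (List Int)) (N : Nat) (mask u : Nat) : PySem.Dict Int Int :=
  if h : mask.testBit u = false then PySem.Dict.empty
  else if mask = 2^u then PySem.Dict.empty.insert 0 1
  else (List.range N).foldl
    (pvGStep adj u (mask - 2^u) (fun v => pvG adj N (mask - 2^u) v)) PySem.Dict.empty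
termination_by mask
decreasing_by
  have h0 : mask ≠ 0 := by intro he; subst he; simp [Nat.zero_testBit] at h
  exact Nat.sub_lt (Nat.pos_of_ne_zero h0) (Nat.two_pow_pos u)

-- partial merge over the first k sources
def pvGPart (adj : List (List Int)) (N : Nat) (mask u k : Nat) : PySem.Dict Int Int :=
  (List.range k).foldl (pvGStep adj u (mask - 2^u) (pvG adj N (mask - 2^u))) PySem.Dict.empty

def pvOpt (d : PySem.Dict Int Int) : Option (PySem.Dict Int Int) :=
  if d.items = [] then none else some d

-- ---- table lemmas ----
def pvShape (N : Nat) (t : pvTab) : Prop := t.length = 2^N ∧ ∀ r ∈ t, r.length = N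

lemma pvRow_mem (t : pvTab) (M : Nat) (hM : M < t.length) : t.getD M [] ∈ t := by
  rw [List.getD_eq_getElem?_getD, List.getElem?_eq_getElem hM]
  exact List.getElem_mem hM

lemma pvShape_set (N : Nat) (t : pvTab) (M u : Nat) (d : Option (PySem.Dict Int Int))
    (h : pvShape N t) : pvShape N (pvSet t M u d) := by
  by_cases hM : M < t.length
  · refine ⟨by rw [pvSet, List.length_set]; exact h.1, ?_⟩
    intro r hr
    rcases List.mem_or_eq_of_mem_set hr with h' | h'
    · exact h.2 r h'
    · subst h'
      rw [List.length_set]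
      exact h.2 _ (pvRow_mem t M hM)
  · rw [pvSet, List.set_eq_of_length_le (by omega)]
    exact h

lemma pvGet_set (N : Nat) (t : pvTab) (hsh : pvShape N t) (M u : Nat) (hM : M < 2^N) (hu : u < N)
    (d : Option (PySem.Dict Int Int)) (M' u' : Nat) :
    pvGet (pvSet t M u d) M' u' = if M' = M ∧ u' = u then d else pvGet t M' u' := by
  have hMlen : M < t.length := by rw [hsh.1]; exact hM
  have hrowlen : (t.getD M []).length = N := hsh.2 _ (pvRow_mem t M hMlen)
  rw [List.getD_eq_getElem?_getD] at hrowlen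
  unfold pvGet pvSet
  simp only [List.getD_eq_getElem?_getD]
  rw [List.getElem?_set]
  by_cases hMM : M = M'
  · subst hMM
    rw [if_pos rfl, if_pos hMlen]
    simp only [Option.getD_some]
    rw [List.getElem?_set]
    by_cases huu : u = u'
    · subst huu
      rw [if_pos rfl, if_pos (by omega)]
      simp
    · rw [if_neg huu, if_neg (by rintro ⟨_, h⟩; exact huu h.symm)]
  · rw [if_neg hMM, if_neg (by rintro ⟨h, _⟩; exact hMM h.symm)]

lemma pvShape_foldl {α : Type} (N : Nat) (f : pvTab → α → pvTab)
    (hf : ∀ t x, pvShape N t → pvShape N (f t x)) :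
    ∀ (l : List α) (t : pvTab), pvShape N t → pvShape N (l.foldl f t) := by
  intro l
  induction l with
  | nil => intro t h; exact h
  | cons x xs ih => intro t h; exact ih _ (hf t x h)

lemma pvShape_base (N : Nat) : pvShape N (List.replicate (2^N) (List.replicate N none)) := by
  refine ⟨by simp, ?_⟩
  intro r hr
  rw [List.eq_of_mem_replicate hr]
  simp

lemma pvGet_base (N M w : Nat) :
    pvGet (List.replicate (2^N) (List.replicate N (none : Option (PySem.Dict Int Int)))) M w
      = none := by
  unfold pvGet
  simp only [List.getD_eq_getElem?_getD, List.getElem?_replicate]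
  split
  · simp only [Option.getD_some, List.getElem?_replicate]
    split <;> rfl
  · rfl

lemma pvAddPow_lt (m u N : Nat) (hm : m < 2^N) (hu : u < N) (hb : m.testBit u = false) :
    m + 2^u < 2^N := by
  have hpu := Nat.two_pow_pos u
  have h1 : m / 2^u % 2 = 0 := by
    simp only [Nat.testBit_eq_decide_div_mod_eq, decide_eq_false_iff_not] at hb
    omega
  have hrb : (m % 2^(u+1)).testBit u = false := by
    rw [Nat.testBit_mod_two_pow]
    simp [Nat.testBit_eq_decide_div_mod_eq, h1]
  have hrlt : m % 2^(u+1) < 2^(u+1) := Nat.mod_lt _ (Nat.two_pow_pos _)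
  have hr : m % 2^(u+1) < 2^u := by
    by_contra hc
    have h2 : m % 2^(u+1) / 2^u = 1 := by
      rw [pow_succ] at hrlt
      exact Nat.div_eq_of_lt_le (by omega) (by omega)
    simp only [Nat.testBit_eq_decide_div_mod_eq, h2] at hrb
    simp at hrb
  have hdecomp := Nat.div_add_mod m (2^(u+1))
  have hq : m / 2^(u+1) + 1 ≤ 2^(N-u-1) := by
    by_contra hc
    have h3 : 2^(N-u-1) * 2^(u+1) ≤ (m / 2^(u+1)) * 2^(u+1) :=
      Nat.mul_le_mul_right _ (by omega)
    have h5 : (m / 2^(u+1)) * 2^(u+1) ≤ m := Nat.div_mul_le_self m _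
    rw [← pow_add] at h3
    have h4 : N - u - 1 + (u+1) = N := by omega
    rw [h4] at h3
    omega
  have h5 : m + 2^u < (m / 2^(u+1) + 1) * 2^(u+1) := by
    have := pow_succ 2 u
    nlinarith [hdecomp, hr]
  have h6 : (m / 2^(u+1) + 1) * 2^(u+1) ≤ 2^(N-u-1) * 2^(u+1) :=
    Nat.mul_le_mul_right _ hq
  rw [← pow_add] at h6
  have h4 : N - u - 1 + (u+1) = N := by omega
  rw [h4] at h6
  omega

-- ---- small arithmetic / bit lemmas ----
lemma pvBitAdd (m u : Nat) (h : m.testBit u = false) : (m + 2^u).testBit u = true := by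
  simp only [Nat.testBit_eq_decide_div_mod_eq, decide_eq_true_eq, decide_eq_false_iff_not] at *
  rw [Nat.add_div_right _ (Nat.two_pow_pos u)]; omega

lemma pvBitSub (M u : Nat) (h : M.testBit u = true) : (M - 2^u).testBit u = false := by
  simp only [Nat.testBit_eq_decide_div_mod_eq, decide_eq_true_eq, decide_eq_false_iff_not] at *
  have hp := Nat.two_pow_pos u
  have hle : 2^u ≤ M := by
    by_contra hc; rw [Nat.div_eq_of_lt (by omega)] at h; omega
  have he : M - 2^u + 2^u = M := by omega
  rw [← he, Nat.add_div_right _ hp] at h; omega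

-- ---- dict lemmas ----
lemma pvEmpty_of_items_nil (d : PySem.Dict Int Int) (h : d.items = []) : d = PySem.Dict.empty := by
  apply PySem.Dict.ext; simp [h, PySem.Dict.empty]

lemma pvBump_empty_src (d src : PySem.Dict Int Int) (δ : Int) (h : src.items = []) :
    pvBump d src δ = d := by
  unfold pvBump; rw [h]; rfl

lemma pvInsert_items_ne_nil (d : PySem.Dict Int Int) (k v : Int) : (d.insert k v).items ≠ [] := by
  by_cases h : d.contains k
  · rw [PySem.Dict.items_insert_of_contains _ v h]
    intro hmap
    have hk : k ∈ d.keys := (PySem.Dict.contains_iff_mem_keys _ _).1 h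
    have hne : d.items ≠ [] := by
      intro hnil
      rw [PySem.Dict.keys] at hk
      simp [hnil] at hk
    simp_all
  · rw [PySem.Dict.items_insert_of_not_contains _ v (by simpa using h)]
    simp

lemma pvFoldl_insert_ne_nil (l : List (Int × Int)) (δ : Int) :
    ∀ d : PySem.Dict Int Int, d.items ≠ [] →
      (l.foldl (fun d fcc => d.insert (fcc.1 + δ) (d.getD (fcc.1 + δ) 0 + fcc.2)) d).items ≠ [] := by
  induction l with
  | nil => intro d h; exact h
  | cons x xs ih => intro d _; exact ih _ (pvInsert_items_ne_nil _ _ _)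

lemma pvBump_ne_empty (d src : PySem.Dict Int Int) (δ : Int) (h : src.items ≠ []) :
    (pvBump d src δ).items ≠ [] := by
  unfold pvBump
  cases hsrc : src.items with
  | nil => exact absurd hsrc h
  | cons x xs =>
    rw [List.foldl_cons]
    exact pvFoldl_insert_ne_nil xs δ _ (pvInsert_items_ne_nil _ _ _)

lemma pvOpt_base : pvOpt (PySem.Dict.empty.insert 0 1) = some (PySem.Dict.empty.insert 0 1) := by
  unfold pvOpt
  rw [if_neg (pvInsert_items_ne_nil _ 0 1)]

lemma pvOpt_eq_none_iff (d : PySem.Dict Int Int) : pvOpt d = none ↔ d.items = [] := by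
  unfold pvOpt; split <;> simp_all

lemma pvOpt_eq_some (d d' : PySem.Dict Int Int) (h : pvOpt d = some d') : d' = d := by
  unfold pvOpt at h; split at h <;> simp_all

-- ---- pvG basics ----
lemma pvG_not_mem (adj : List (List Int)) (N mask u : Nat) (h : mask.testBit u = false) :
    pvG adj N mask u = PySem.Dict.empty := by
  rw [pvG]; simp [h]

lemma pvG_single (adj : List (List Int)) (N u : Nat) :
    pvG adj N (2^u) u = PySem.Dict.empty.insert 0 1 := by
  rw [pvG]; simp [Nat.testBit_two_pow_self]

lemma pvG_step (adj : List (List Int)) (N mask u : Nat) (h1 : mask.testBit u = true)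
    (h2 : mask ≠ 2^u) : pvG adj N mask u = pvGPart adj N mask u N := by
  rw [pvG]; simp [h1, h2, pvGPart]

lemma pvGPart_succ (adj : List (List Int)) (N mask u k : Nat) :
    pvGPart adj N mask u (k+1)
      = pvGStep adj u (mask - 2^u) (pvG adj N (mask - 2^u)) (pvGPart adj N mask u k) k := by
  unfold pvGPart; rw [List.range_succ, List.foldl_append]; rfl

lemma pvGStep_apply (adj : List (List Int)) (u pm : Nat) (f : Nat → PySem.Dict Int Int)
    (res : PySem.Dict Int Int) (v : Nat) :
    pvGStep adj u pm f res v
      = if pm.testBit v = false then res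
        else if pvAdj adj v u ≠ 0 then pvBump res (f v) 1
        else if pvAdj adj u v ≠ 0 then pvBump res (f v) 0
        else res := rfl

lemma pvGStep_empty_src (adj : List (List Int)) (u pm : Nat) (f : Nat → PySem.Dict Int Int)
    (res : PySem.Dict Int Int) (v : Nat) (h : (f v).items = []) :
    pvGStep adj u pm f res v = res := by
  unfold pvGStep
  split_ifs with h1 h2 h3
  · rfl
  · exact pvBump_empty_src _ _ _ h
  · exact pvBump_empty_src _ _ _ h
  · rfl

-- ---- the initial table ----
lemma pvShape_init (N : Nat) : pvShape N (pvInit N) := by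
  unfold pvInit
  exact pvShape_foldl N _ (fun t v h => pvShape_set N t _ _ _ h) _ _ (pvShape_base N)

lemma pvInit_eq (N : Nat) (M w : Nat) :
    pvGet (pvInit N) M w = if w < N ∧ M = 2^w then some (PySem.Dict.empty.insert 0 1) else none := by
  have haux : ∀ (l : List Nat) (t : pvTab), pvShape N t → (∀ v ∈ l, v < N) →
      pvGet (l.foldl (fun t v => pvSet t (2^v) v (some (PySem.Dict.empty.insert 0 1))) t) M w
        = if w ∈ l ∧ M = 2^w then some (PySem.Dict.empty.insert 0 1) else pvGet t M w := by
    intro l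
    induction l with
    | nil => intro t _ _; simp
    | cons v vs ih =>
      intro t hsh hlt
      rw [List.foldl_cons, ih _ (pvShape_set N t _ _ _ hsh) (fun x hx => hlt x (by simp [hx]))]
      have hvN : v < N := hlt v (by simp)
      have hpv : 2^v < 2^N := Nat.pow_lt_pow_right (by norm_num) hvN
      by_cases h1 : w ∈ vs ∧ M = 2^w
      · rw [if_pos h1, if_pos ⟨by simp [h1.1], h1.2⟩]
      · rw [if_neg h1, pvGet_set N t hsh _ _ hpv hvN]
        by_cases h2 : M = 2^v ∧ w = v
        · rw [if_pos h2, if_pos ⟨by simp [h2.2], by rw [h2.2, h2.1]⟩]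
        · rw [if_neg h2, if_neg ?_]
          rintro ⟨hw, hM⟩
          rcases List.mem_cons.1 hw with h | h
          · exact h2 ⟨by rw [hM, h], h⟩
          · exact h1 ⟨h, hM⟩
  unfold pvInit
  rw [haux (List.range N) _ (pvShape_base N) (fun v hv => List.mem_range.1 hv), pvGet_base]
  simp [List.mem_range]

-- ---- the invariant ----
def pvInv (adj : List (List Int)) (N m : Nat) (t : pvTab) : Prop :=
  ∀ M u, M < 2^N → u < N →
    pvGet t M u = if M.testBit u = true ∧ 1 ≤ M - 2^u ∧ M - 2^u < m
            then pvOpt (pvG adj N M u)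
            else (if u < N ∧ M = 2^u then some (PySem.Dict.empty.insert 0 1) else none)

lemma pvInv_read (adj : List (List Int)) (N m : Nat) (t : pvTab) (hI : pvInv adj N m t)
    (M v : Nat) (hM : M < 2^N) (hv : v < N) (hlt : M - 2^v < m) :
    pvGet t M v = pvOpt (pvG adj N M v) := by
  rw [hI M v hM hv]
  by_cases hb : M.testBit v = true
  · by_cases h1 : 1 ≤ M - 2^v
    · rw [if_pos ⟨hb, h1, hlt⟩]
    · have hge : 2^v ≤ M := Nat.ge_two_pow_of_testBit hb
      have hM : M = 2^v := by omega
      rw [if_neg (by rintro ⟨_, h, _⟩; omega), if_pos ⟨hv, hM⟩, hM, pvG_single, pvOpt_base]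
  · have hb' : M.testBit v = false := by simpa using hb
    have hM : M ≠ 2^v := by
      intro he; rw [he, Nat.testBit_two_pow_self] at hb'; simp at hb'
    rw [if_neg (by rintro ⟨h, _, _⟩; exact hb h), if_neg (by rintro ⟨_, h⟩; exact hM h),
      pvG_not_mem adj N M v hb']
    rfl

lemma pvInv_init (adj : List (List Int)) (N : Nat) : pvInv adj N 1 (pvInit N) := by
  intro M u _ hu
  rw [pvInit_eq]
  have : ¬ (M.testBit u = true ∧ 1 ≤ M - 2^u ∧ M - 2^u < 1) := by rintro ⟨_, h1, h2⟩; omega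
  rw [if_neg this]

-- one source step: effect of pvStepU on every cell
lemma pvStepU_cells (adj : List (List Int)) (N m v : Nat) (t : pvTab) (hsh : pvShape N t)
    (hsrc : pvGet t m v = some (pvG adj N m v)) (hv : m.testBit v = true) (hm : 1 ≤ m)
    (u : Nat) (hu : u < N) (hM0 : m.testBit u = false → m + 2^u < 2^N)
    (hcell : m.testBit u = false → pvGet t (m + 2^u) u = pvOpt (pvGPart adj N (m + 2^u) u v))
    (hne : (pvG adj N m v).items ≠ []) :
    ∀ M w, pvGet (pvStepU adj m v t u) M w
      = if w = u ∧ m.testBit u = false ∧ M = m + 2^u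
        then pvOpt (pvGPart adj N (m + 2^u) u (v+1))
        else pvGet t M w := by
  intro M w
  have hp := Nat.two_pow_pos u
  have hMne : m + 2^u ≠ m := by omega
  have hsub : m + 2^u - 2^u = m := by omega
  unfold pvStepU
  by_cases hb : m.testBit u
  · rw [if_pos hb, if_neg (by rintro ⟨_, h, _⟩; simp [hb] at h)]
  · have hb' : m.testBit u = false := by simpa using hb
    rw [if_neg hb]
    have hM0' := hM0 hb'
    have hcv := hcell hb'
    have hpart : ∀ δ : Int, pvGet (pvPush t m v (m + 2^u) u δ) M w
        = if M = m + 2^u ∧ w = u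
          then some (pvBump (pvGPart adj N (m + 2^u) u v) (pvG adj N m v) δ)
          else pvGet t M w := by
      intro δ
      unfold pvPush
      cases htu : pvGet t (m + 2^u) u with
      | none =>
        simp only [htu]
        have hsh1 : pvShape N (pvSet t (m + 2^u) u (some PySem.Dict.empty)) :=
          pvShape_set N t _ _ _ hsh
        have h1 : pvGet (pvSet t (m + 2^u) u (some PySem.Dict.empty)) (m + 2^u) u
            = some PySem.Dict.empty := by
          rw [pvGet_set N t hsh _ _ hM0' hu, if_pos ⟨rfl, rfl⟩]
        have h2 : pvGet (pvSet t (m + 2^u) u (some PySem.Dict.empty)) m v = pvGet t m v := by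
          rw [pvGet_set N t hsh _ _ hM0' hu, if_neg (by rintro ⟨h, _⟩; exact hMne h.symm)]
        rw [pvGet_set N _ hsh1 _ _ hM0' hu]
        by_cases hMw : M = m + 2^u ∧ w = u
        · rw [if_pos hMw, if_pos hMw]
          rw [h1, h2, hsrc]
          have hgp : pvGPart adj N (m + 2^u) u v = PySem.Dict.empty :=
            pvEmpty_of_items_nil _ (by
              have hcv2 := hcv; rw [htu] at hcv2
              exact (pvOpt_eq_none_iff _).1 hcv2.symm)
          simp [hgp]
        · rw [if_neg hMw, if_neg hMw, pvGet_set N t hsh _ _ hM0' hu, if_neg hMw]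
      | some d0 =>
        simp only [htu]
        rw [pvGet_set N t hsh _ _ hM0' hu]
        by_cases hMw : M = m + 2^u ∧ w = u
        · rw [if_pos hMw, if_pos hMw, hsrc]
          have hd0 : d0 = pvGPart adj N (m + 2^u) u v := by
            rw [htu] at hcv; exact pvOpt_eq_some _ _ hcv.symm
          simp [hd0]
        · rw [if_neg hMw, if_neg hMw]
    have hstep : pvGPart adj N (m + 2^u) u (v+1)
        = pvGStep adj u m (pvG adj N m) (pvGPart adj N (m + 2^u) u v) v := by
      rw [pvGPart_succ, hsub]
    by_cases ha1 : pvAdj adj v u ≠ 0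
    · rw [if_pos ha1, hpart 1]
      by_cases hMw : M = m + 2^u ∧ w = u
      · rw [if_pos hMw, if_pos ⟨hMw.2, hb', hMw.1⟩, hstep]
        unfold pvGStep
        rw [if_neg (by simp [hv]), if_pos ha1]
        unfold pvOpt
        rw [if_neg (pvBump_ne_empty _ _ _ hne)]
      · rw [if_neg hMw, if_neg (by rintro ⟨h1, _, h3⟩; exact hMw ⟨h3, h1⟩)]
    · rw [if_neg ha1]
      by_cases ha2 : pvAdj adj u v ≠ 0
      · rw [if_pos ha2, hpart 0]
        by_cases hMw : M = m + 2^u ∧ w = u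
        · rw [if_pos hMw, if_pos ⟨hMw.2, hb', hMw.1⟩, hstep]
          unfold pvGStep
          rw [if_neg (by simp [hv]), if_neg ha1, if_pos ha2]
          unfold pvOpt
          rw [if_neg (pvBump_ne_empty _ _ _ hne)]
        · rw [if_neg hMw, if_neg (by rintro ⟨h1, _, h3⟩; exact hMw ⟨h3, h1⟩)]
      · rw [if_neg ha2]
        by_cases hMw : w = u ∧ m.testBit u = false ∧ M = m + 2^u
        · rw [if_pos hMw, hstep]
          unfold pvGStep
          rw [if_neg (by simp [hv]), if_neg ha1, if_neg ha2, ← hcv, hMw.2.2, hMw.1]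
        · rw [if_neg hMw]

lemma pvShape_push (N : Nat) (t : pvTab) (m v M u : Nat) (δ : Int) (h : pvShape N t) :
    pvShape N (pvPush t m v M u δ) := by
  unfold pvPush
  cases pvGet t M u <;> exact pvShape_set N _ _ _ _ (by first | exact h | exact pvShape_set N t _ _ _ h)

lemma pvShape_stepU (adj : List (List Int)) (N m v : Nat) (t : pvTab) (u : Nat)
    (h : pvShape N t) : pvShape N (pvStepU adj m v t u) := by
  unfold pvStepU
  split_ifs <;> first | exact h | exact pvShape_push N t _ _ _ _ _ h

lemma pvShape_stepV (adj : List (List Int)) (N m : Nat) (t : pvTab) (v : Nat)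
    (h : pvShape N t) : pvShape N (pvStepV adj N m t v) := by
  unfold pvStepV
  cases pvGet t m v with
  | none => exact h
  | some _ => exact pvShape_foldl N _ (fun t u hh => pvShape_stepU adj N m v t u hh) _ _ h

lemma pvShape_stepMask (adj : List (List Int)) (N : Nat) (t : pvTab) (m : Nat)
    (h : pvShape N t) : pvShape N (pvStepMask adj N t m) := by
  unfold pvStepMask
  exact pvShape_foldl N _ (fun t v hh => pvShape_stepV adj N m t v hh) _ _ h

-- the u-loop: all target cells advance from stage v to stage v+1
lemma pvStepU_loop (adj : List (List Int)) (N m v : Nat) (t : pvTab) (hsh : pvShape N t)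
    (hsrc : pvGet t m v = some (pvG adj N m v)) (hv : m.testBit v = true) (hm : 1 ≤ m)
    (hm2 : m < 2^N)
    (l : List Nat) (hl : l.Nodup) (hlN : ∀ w ∈ l, w < N)
    (hcells : ∀ w ∈ l, m.testBit w = false →
      pvGet t (m + 2^w) w = pvOpt (pvGPart adj N (m + 2^w) w v))
    (hne : (pvG adj N m v).items ≠ []) :
    ∀ M w, pvGet (l.foldl (pvStepU adj m v) t) M w
      = if w ∈ l ∧ m.testBit w = false ∧ M = m + 2^w
        then pvOpt (pvGPart adj N (m + 2^w) w (v+1))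
        else pvGet t M w := by
  induction l generalizing t with
  | nil => intro M w; simp
  | cons u0 us ih =>
    intro M w
    rw [List.foldl_cons]
    have hu0N : u0 < N := hlN u0 (by simp)
    have hstep := pvStepU_cells adj N m v t hsh hsrc hv hm u0 hu0N
      (fun hb => pvAddPow_lt m u0 N hm2 hu0N hb)
      (fun hb => hcells u0 (by simp) hb) hne
    have hsh' : pvShape N (pvStepU adj m v t u0) := pvShape_stepU adj N m v t u0 hsh
    have hsrc' : pvGet (pvStepU adj m v t u0) m v = some (pvG adj N m v) := by
      rw [hstep, if_neg ?_, hsrc]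
      rintro ⟨_, _, h3⟩
      have := Nat.two_pow_pos u0; omega
    have hcells' : ∀ w' ∈ us, m.testBit w' = false →
        pvGet (pvStepU adj m v t u0) (m + 2^w') w'
          = pvOpt (pvGPart adj N (m + 2^w') w' v) := by
      intro w' hw' hbw'
      rw [hstep, if_neg ?_]
      · exact hcells w' (by simp [hw']) hbw'
      · rintro ⟨h1, _, _⟩
        exact (List.nodup_cons.1 hl).1 (h1 ▸ hw')
    rw [ih _ hsh' hsrc' (List.nodup_cons.1 hl).2
      (fun w hw => hlN w (List.mem_cons_of_mem _ hw)) hcells']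
    by_cases hin : w ∈ us ∧ m.testBit w = false ∧ M = m + 2^w
    · rw [if_pos hin, if_pos ⟨by simp [hin.1], hin.2.1, hin.2.2⟩]
    · rw [if_neg hin, hstep]
      by_cases h0 : w = u0 ∧ m.testBit w = false ∧ M = m + 2^w
      · obtain ⟨h1, h2, h3⟩ := h0
        subst h1
        rw [if_pos ⟨rfl, h2, h3⟩, if_pos ⟨List.mem_cons_self, h2, h3⟩]
      · rw [if_neg ?_, if_neg ?_]
        · rintro ⟨h1, h2, h3⟩
          rcases (List.mem_cons.1 h1) with h | h
          · exact h0 ⟨h, h2, h3⟩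
          · exact hin ⟨h, h2, h3⟩
        · rintro ⟨h1, h2, h3⟩
          subst h1
          exact h0 ⟨rfl, h2, h3⟩

-- one full source step pvStepV
lemma pvStepV_cells (adj : List (List Int)) (N m v : Nat) (t : pvTab) (hsh : pvShape N t)
    (hread : pvGet t m v = pvOpt (pvG adj N m v)) (hm : 1 ≤ m) (hm2 : m < 2^N)
    (hcells : ∀ w, w < N → m.testBit w = false →
      pvGet t (m + 2^w) w = pvOpt (pvGPart adj N (m + 2^w) w v)) :
    ∀ M w, pvGet (pvStepV adj N m t v) M w
      = if w < N ∧ m.testBit w = false ∧ M = m + 2^w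
        then pvOpt (pvGPart adj N (m + 2^w) w (v+1))
        else pvGet t M w := by
  intro M w
  unfold pvStepV
  cases hmv : pvGet t m v with
  | none =>
    dsimp only
    have hnil : (pvG adj N m v).items = [] := by
      rw [hmv] at hread; exact (pvOpt_eq_none_iff _).1 hread.symm
    by_cases hin : w < N ∧ m.testBit w = false ∧ M = m + 2^w
    · rw [if_pos hin, hin.2.2, pvGPart_succ,
        pvGStep_empty_src adj w _ _ _ v (by rw [Nat.add_sub_cancel]; exact hnil)]
      exact hcells w hin.1 hin.2.1
    · rw [if_neg hin]
  | some dv =>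
    have hdv : dv = pvG adj N m v := by rw [hmv] at hread; exact pvOpt_eq_some _ _ hread.symm
    have hnil : (pvG adj N m v).items ≠ [] := by
      intro hn; rw [hmv, ← hdv] at hread
      rw [(pvOpt_eq_none_iff _).2 (hdv ▸ hn)] at hread; exact (by simp at hread)
    have hv : m.testBit v = true := by
      by_contra hc
      rw [pvG_not_mem adj N m v (by simpa using hc)] at hnil
      exact hnil rfl
    have hsrc : pvGet t m v = some (pvG adj N m v) := by rw [hmv, hdv]
    dsimp only
    rw [pvStepU_loop adj N m v t hsh hsrc hv hm hm2 (List.range N) (List.nodup_range)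
      (fun w hw => List.mem_range.1 hw)
      (fun w hw hbw => hcells w (List.mem_range.1 hw) hbw) hnil M w]
    simp [List.mem_range]

-- the v-loop of one mask
lemma pvOpt_empty : pvOpt PySem.Dict.empty = none := rfl

lemma pvStepMask_inv (adj : List (List Int)) (N m : Nat) (t : pvTab) (hsh : pvShape N t)
    (hI : pvInv adj N m t) (hm : 1 ≤ m) (hm2 : m < 2^N) :
    pvInv adj N (m+1) (pvStepMask adj N t m) := by
  have hJ : ∀ k, k ≤ N → ∀ M w, pvGet ((List.range k).foldl (pvStepV adj N m) t) M w
      = if w < N ∧ m.testBit w = false ∧ M = m + 2^w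
        then pvOpt (pvGPart adj N (m + 2^w) w k)
        else pvGet t M w := by
    intro k
    induction k with
    | zero =>
      intro _ M w
      simp only [List.range_zero, List.foldl_nil]
      by_cases hin : w < N ∧ m.testBit w = false ∧ M = m + 2^w
      · rw [if_pos hin]
        have hpw := Nat.two_pow_pos w
        have hMlt : M < 2^N := hin.2.2 ▸ pvAddPow_lt m w N hm2 hin.1 hin.2.1
        have htM := hI M w hMlt hin.1
        rw [if_neg (by rintro ⟨_, _, hlt⟩; rw [hin.2.2] at hlt; omega),
          if_neg (by rintro ⟨_, hM⟩; rw [hin.2.2] at hM; omega)] at htM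
        rw [htM]
        have hz : pvGPart adj N (m + 2^w) w 0 = PySem.Dict.empty := rfl
        rw [hz, pvOpt_empty]
      · rw [if_neg hin]
    | succ k ihk =>
      intro hk M w
      rw [List.range_succ, List.foldl_append, List.foldl_cons, List.foldl_nil]
      have hkN : k < N := hk
      have hpk := Nat.two_pow_pos k
      have hshTk : pvShape N ((List.range k).foldl (pvStepV adj N m) t) :=
        pvShape_foldl N _ (fun t v hh => pvShape_stepV adj N m t v hh) _ _ hsh
      have hread : pvGet ((List.range k).foldl (pvStepV adj N m) t) m k
          = pvOpt (pvG adj N m k) := by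
        rw [ihk (le_of_lt hkN) m k, if_neg (by rintro ⟨_, _, h3⟩; omega)]
        exact pvInv_read adj N m t hI m k hm2 hkN (by omega)
      have hcells : ∀ w', w' < N → m.testBit w' = false →
          pvGet ((List.range k).foldl (pvStepV adj N m) t) (m + 2^w') w'
            = pvOpt (pvGPart adj N (m + 2^w') w' k) := by
        intro w' hw' hbw'
        rw [ihk (le_of_lt hkN) _ w', if_pos ⟨hw', hbw', rfl⟩]
      rw [pvStepV_cells adj N m k _ hshTk hread hm hm2 hcells M w]
      by_cases hin : w < N ∧ m.testBit w = false ∧ M = m + 2^w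
      · rw [if_pos hin, if_pos hin]
      · rw [if_neg hin, if_neg hin, ihk (le_of_lt hkN) M w, if_neg hin]
  intro M u hM hu
  unfold pvStepMask
  rw [hJ N le_rfl M u]
  by_cases hin : u < N ∧ m.testBit u = false ∧ M = m + 2^u
  · obtain ⟨hu', hb, hMe⟩ := hin
    subst hMe
    rw [if_pos ⟨hu', hb, rfl⟩]
    have hpu := Nat.two_pow_pos u
    have htb : (m + 2^u).testBit u = true := pvBitAdd m u hb
    rw [if_pos ⟨htb, by omega, by omega⟩, pvG_step adj N (m + 2^u) u htb (by omega)]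
  · rw [if_neg hin, hI M u hM hu]
    by_cases hcond : M.testBit u = true ∧ 1 ≤ M - 2^u ∧ M - 2^u < m
    · rw [if_pos hcond, if_pos ⟨hcond.1, hcond.2.1, by omega⟩]
    · by_cases hcond' : M.testBit u = true ∧ 1 ≤ M - 2^u ∧ M - 2^u < m + 1
      · exfalso
        have h1 : M - 2^u = m := by
          rcases hcond' with ⟨a, b, c⟩
          by_cases hx : M - 2^u < m
          · exact absurd ⟨a, b, hx⟩ hcond
          · omega
        have hge : 2^u ≤ M := Nat.ge_two_pow_of_testBit hcond'.1
        have hbm : m.testBit u = false := by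
          have hbs := pvBitSub M u hcond'.1
          rwa [h1] at hbs
        exact hin ⟨hu, hbm, by omega⟩
      · rw [if_neg hcond, if_neg hcond']

lemma pvMasks_inv (adj : List (List Int)) (N : Nat) (len : Nat) :
    ∀ (s : Nat) (t : pvTab), 1 ≤ s → s + len ≤ 2^N → pvShape N t → pvInv adj N s t →
      pvInv adj N (s + len) ((List.range' s len).foldl (pvStepMask adj N) t) := by
  induction len with
  | zero => intro s t _ _ _ h; simpa using h
  | succ len ih =>
    intro s t hs hs2 hsh h
    rw [List.range'_succ]
    have hstep := pvStepMask_inv adj N s t hsh h hs (by omega)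
    have := ih (s+1) (pvStepMask adj N t s) (by omega) (by omega)
      (pvShape_stepMask adj N t s hsh) hstep
    simpa [Nat.add_assoc, Nat.add_comm 1 len] using this

-- A computes the fold of pvG over all endpoints
lemma pvA_eq (adj : List (List Int)) (n : Int) :
    ham_paths_by_fwd adj n
      = ((List.range n.toNat).foldl
          (fun F v => pvBump F (pvG adj n.toNat (2^n.toNat - 1) v) 0) PySem.Dict.empty).items := by
  unfold ham_paths_by_fwd
  dsimp only
  have hp := Nat.two_pow_pos n.toNat
  have hInv : pvInv adj n.toNat (2^n.toNat)
      ((List.range' 1 (2^n.toNat - 1)).foldl (pvStepMask adj n.toNat) (pvInit n.toNat)) := by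
    have h := pvMasks_inv adj n.toNat (2^n.toNat - 1) 1 (pvInit n.toNat) le_rfl (by omega)
      (pvShape_init n.toNat) (pvInv_init adj n.toNat)
    have h2 : 1 + (2^n.toNat - 1) = 2^n.toNat := by omega
    rwa [h2] at h
  congr 1
  apply PySem.List.foldl_congr_mem
  intro F v hv
  have hvN := List.mem_range.1 hv
  rw [pvInv_read adj n.toNat (2^n.toNat) _ hInv (2^n.toNat - 1) v (by omega) hvN
    (by have := Nat.two_pow_pos v; omega)]
  cases hop : pvOpt (pvG adj n.toNat (2^n.toNat - 1) v) with
  | none =>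
    dsimp only
    exact (pvBump_empty_src _ _ _ ((pvOpt_eq_none_iff _).1 hop)).symm
  | some d =>
    dsimp only
    rw [pvOpt_eq_some _ _ hop]

-- ---- B side ----
def pvGood (adj : List (List Int)) (N : Nat)
    (c : PySem.Dict (Nat × Nat) (PySem.Dict Int Int)) : Prop :=
  ∀ p d, c.get? p = some d → d = pvG adj N p.1 p.2

lemma pvPathsLoop_correct (adj : List (List Int)) (N u pm : Nat)
    (IH : ∀ (w : Nat) (c : PySem.Dict (Nat × Nat) (PySem.Dict Int Int)), pvGood adj N c →
      (pvPathsB adj N pm w c).1 = pvG adj N pm w ∧ pvGood adj N (pvPathsB adj N pm w c).2) :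
    ∀ (l : List Nat) (res : PySem.Dict Int Int)
      (c : PySem.Dict (Nat × Nat) (PySem.Dict Int Int)), pvGood adj N c →
      (pvPathsLoop adj N u pm l res c).1
          = l.foldl (pvGStep adj u pm (pvG adj N pm)) res
        ∧ pvGood adj N (pvPathsLoop adj N u pm l res c).2 := by
  intro l
  induction l with
  | nil => intro res c hc; rw [pvPathsLoop]; exact ⟨rfl, hc⟩
  | cons v vs ihl =>
    intro res c hc
    rw [pvPathsLoop, List.foldl_cons, pvGStep_apply]
    dsimp only
    by_cases hb : pm.testBit v = false
    · rw [if_pos hb, if_pos hb]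
      exact ihl res c hc
    · rw [if_neg hb, if_neg hb]
      by_cases ha1 : pvAdj adj v u ≠ 0
      · rw [if_pos ha1, if_pos ha1]
        obtain ⟨he, hg⟩ := IH v c hc
        rw [he]
        exact ihl _ _ hg
      · rw [if_neg ha1, if_neg ha1]
        by_cases ha2 : pvAdj adj u v ≠ 0
        · rw [if_pos ha2, if_pos ha2]
          obtain ⟨he, hg⟩ := IH v c hc
          rw [he]
          exact ihl _ _ hg
        · rw [if_neg ha2, if_neg ha2]
          exact ihl res c hc

lemma pvPathsB_correct (adj : List (List Int)) (N : Nat) : ∀ (mask u : Nat)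
    (c : PySem.Dict (Nat × Nat) (PySem.Dict Int Int)), pvGood adj N c →
    (pvPathsB adj N mask u c).1 = pvG adj N mask u ∧ pvGood adj N (pvPathsB adj N mask u c).2 := by
  intro mask
  induction mask using Nat.strong_induction_on with
  | _ mask ih =>
    intro u c hc
    rw [pvPathsB]
    by_cases h1 : mask.testBit u = false
    · rw [dif_pos h1]
      exact ⟨(pvG_not_mem adj N mask u h1).symm, hc⟩
    · rw [dif_neg h1]
      have h1' : mask.testBit u = true := by simpa using h1
      by_cases h2 : mask = 2^u
      · rw [if_pos h2]
        subst h2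
        exact ⟨(pvG_single adj N u).symm, hc⟩
      · rw [if_neg h2]
        have hpu := Nat.two_pow_pos u
        have h0 : mask ≠ 0 := by
          intro he; rw [he, Nat.zero_testBit] at h1'; simp at h1'
        have hlt : mask - 2^u < mask := by
          have := Nat.ge_two_pow_of_testBit h1'; omega
        cases hg : PySem.Dict.get? c (mask, u) with
        | some d =>
          exact ⟨hc (mask, u) d hg, hc⟩
        | none =>
          have IH : ∀ (w : Nat) (c' : PySem.Dict (Nat × Nat) (PySem.Dict Int Int)),
              pvGood adj N c' → (pvPathsB adj N (mask - 2^u) w c').1 = pvG adj N (mask - 2^u) w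
                ∧ pvGood adj N (pvPathsB adj N (mask - 2^u) w c').2 :=
            fun w c' hc' => ih (mask - 2^u) hlt w c' hc'
          obtain ⟨he, hg'⟩ := pvPathsLoop_correct adj N u (mask - 2^u) IH (List.range N)
            PySem.Dict.empty c hc
          have hval : (pvPathsLoop adj N u (mask - 2^u) (List.range N) PySem.Dict.empty c).1
              = pvG adj N mask u := by
            rw [he, pvG_step adj N mask u h1' h2]
            rfl
          refine ⟨hval, ?_⟩
          intro p d hpd
          rw [PySem.Dict.get?_insert] at hpd
          by_cases hp : p = (mask, u)
          · rw [if_pos hp] at hpd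
            cases hpd
            rw [hval, hp]
          · rw [if_neg hp] at hpd
            exact hg' p d hpd

lemma pvB_eq (adj : List (List Int)) (n : Int) :
    ham_paths_by_fwd_alt adj n
      = ((List.range n.toNat).foldl
          (fun F v => pvBump F (pvG adj n.toNat (2^n.toNat - 1) v) 0) PySem.Dict.empty).items := by
  unfold ham_paths_by_fwd_alt
  dsimp only
  congr 1
  have haux : ∀ (l : List Nat) (F : PySem.Dict Int Int)
      (c : PySem.Dict (Nat × Nat) (PySem.Dict Int Int)), pvGood adj n.toNat c →
      ((l.foldl (fun (p : PySem.Dict Int Int × PySem.Dict (Nat × Nat) (PySem.Dict Int Int)) u =>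
          (pvBump p.1 (pvPathsB adj n.toNat (2^n.toNat - 1) u p.2).1 0,
           (pvPathsB adj n.toNat (2^n.toNat - 1) u p.2).2)) (F, c)).1
        = l.foldl (fun F v => pvBump F (pvG adj n.toNat (2^n.toNat - 1) v) 0) F) := by
    intro l
    induction l with
    | nil => intro F c _; rfl
    | cons v vs ihl =>
      intro F c hc
      rw [List.foldl_cons, List.foldl_cons]
      obtain ⟨he, hg⟩ := pvPathsB_correct adj n.toNat (2^n.toNat - 1) v c hc
      dsimp only
      rw [he]
      exact ihl _ _ hg
  exact haux (List.range n.toNat) PySem.Dict.empty PySem.Dict.empty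
    (by intro p d h; rw [PySem.Dict.get?_empty] at h; cases h)

-- ===== VERDICT (by name: the statement is the Claim_ definition above) =====
theorem ham_paths_by_fwd_spec : Claim_equal_ham_paths_by_fwd := by
  intro adj n _ _
  unfold Spec_ham_paths_by_fwd
  rw [pvA_eq, pvB_eq]
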